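-- pv_equiv track=rewrite | github.com/nikolay-sobyanin/algorithms | yandex_al_20/lesson_6/A. Binary search.py | l_search
-- ===== SOURCE A (Python) =====
-- def l_search(arr, p):
--     l = 0
--     r = len(arr) - 1
--     while l < r:
--         m = (l + r) // 2
--         if arr[m] >= p:
--             r = m
--         else:
--             l = m + 1
--     return l
-- ===== SOURCE B (Python) =====
-- def l_search(arr, p):
--     # recursive divide-and-conquer on actual sublists: shrink a slice, carry its offset
--     def go(seg, off):
--         n = len(seg)
--         if n <= 1:
--             return off
--         m = (n - 1) // 2
--         if seg[m] >= p:
--             return go(seg[:m + 1], off)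
--         return go(seg[m + 1:], off + m + 1)
--     return go(arr, 0)
-- ===== Notes on version B (the rewrite author's own statement) =====
-- stated objective: alternative
-- what changed: Replaces the iterative two-pointer (l, r) while-loop over fixed indices with a structural divide-and-conquer recursion on actual sublists: go(seg, off) slices the list (seg[:m+1] / seg[m+1:]) and carries the absolute offset, terminating when the slice has at most one element; it inspects the same elements and returns the identical index.
import Mathlib
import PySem

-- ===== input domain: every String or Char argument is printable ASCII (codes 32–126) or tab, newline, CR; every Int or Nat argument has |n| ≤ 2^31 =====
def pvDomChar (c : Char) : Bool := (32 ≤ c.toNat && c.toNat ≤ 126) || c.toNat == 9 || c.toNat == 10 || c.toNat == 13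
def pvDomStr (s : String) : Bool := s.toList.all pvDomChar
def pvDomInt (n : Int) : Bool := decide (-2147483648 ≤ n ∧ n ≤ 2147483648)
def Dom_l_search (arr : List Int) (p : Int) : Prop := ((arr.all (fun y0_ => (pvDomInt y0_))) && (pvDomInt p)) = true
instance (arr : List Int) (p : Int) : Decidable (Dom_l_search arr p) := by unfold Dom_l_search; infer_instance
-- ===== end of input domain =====

-- B replaces A's two-pointer (l, r) while-loop with a structural divide-and-conquer
-- recursion on actual sublists (slice + offset); same return value everywhere.

-- ===== PORT A =====
-- A's while loop, step for step, on the pointer pair (l, r). The Nat fuel is only a totality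
-- guard: each iteration shrinks r - l by at least 1, so fuel = arr.length never runs out
-- before the loop exits. arr[m] is ported as pyGetD arr m 0: on the states the loop reaches
-- (0 ≤ l ≤ m < r ≤ len-1) the index is in range, so this is exact (Python never raises).
def lsLoop (arr : List Int) (p : Int) : Nat → Int → Int → Int
  | 0, l, _ => l
  | fuel + 1, l, r =>
    if l < r then
      if PySem.List.pyGetD arr (PySem.Int.floordiv (l + r) 2) 0 ≥ p then
        lsLoop arr p fuel l (PySem.Int.floordiv (l + r) 2)
      else
        lsLoop arr p fuel (PySem.Int.floordiv (l + r) 2 + 1) r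
    else l

def l_search (arr : List Int) (p : Int) : Int :=
  lsLoop arr p arr.length 0 ((arr.length : Int) - 1)

-- ===== PORT B =====
-- B's go(seg, off): recursion on the sublist itself. The slices seg[:m+1] and seg[m+1:]
-- have nonnegative in-range bounds, so they are exactly List.take / List.drop
-- (PySem.List.slice_to_natCast / slice_from_natCast); m = (n-1)//2 on a Nat length is Nat
-- division (PySem.Int.floordiv_natCast). Recursion is well-founded on seg.length.
def lsGo (p : Int) (seg : List Int) (off : Int) : Int :=
  if h : seg.length ≤ 1 then off
  else
    let m := (seg.length - 1) / 2
    if PySem.List.pyGetD seg (m : Int) 0 ≥ p then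
      lsGo p (seg.take (m + 1)) off
    else
      lsGo p (seg.drop (m + 1)) (off + (m : Int) + 1)
termination_by seg.length
decreasing_by
  · have : m = (seg.length - 1) / 2 := rfl
    simp only [List.length_take]; omega
  · have : m = (seg.length - 1) / 2 := rfl
    simp only [List.length_drop]; omega

def l_search_alt (arr : List Int) (p : Int) : Int :=
  lsGo p arr 0

-- ===== PRECONDITION & SPEC =====
def Spec_l_search (arr : List Int) (p : Int) (out : Int) : Prop := out = l_search_alt arr p
instance (arr : List Int) (p : Int) (out : Int) : Decidable (Spec_l_search arr p out) := by unfold Spec_l_search; infer_instance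

-- ===== CLAIM =====
def Claim_equal_l_search : Prop := ∀ (arr : List Int) (p : Int), Dom_l_search arr p → Spec_l_search arr p (l_search arr p)

-- ===== LEMMAS AND PROOFS =====

theorem lsGo_base (p : Int) (seg : List Int) (off : Int) (h : seg.length ≤ 1) :
    lsGo p seg off = off := by
  rw [lsGo]; simp [h]

theorem lsGo_step (p : Int) (seg : List Int) (off : Int) (h : ¬ seg.length ≤ 1) :
    lsGo p seg off =
      if PySem.List.pyGetD seg (((seg.length - 1) / 2 : Nat) : Int) 0 ≥ p then
        lsGo p (seg.take ((seg.length - 1) / 2 + 1)) off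
      else
        lsGo p (seg.drop ((seg.length - 1) / 2 + 1)) (off + (((seg.length - 1) / 2 : Nat) : Int) + 1) := by
  rw [lsGo]; simp [h]

-- invariant: A's loop on pointers (l, r) equals B's recursion on the sublist arr[l..r]
theorem lsLoop_eq_lsGo (arr : List Int) (p : Int) :
    ∀ (fuel l r : Nat), r < arr.length → r - l < fuel → l ≤ r →
      lsLoop arr p fuel (l : Int) (r : Int) =
        lsGo p ((arr.drop l).take (r + 1 - l)) (l : Int) := by
  intro fuel
  induction fuel with
  | zero => intro l r _ hf _; omega
  | succ f ih =>
    intro l r hr hf hlr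
    have hlen : ((arr.drop l).take (r + 1 - l)).length = r + 1 - l := by
      simp [List.length_take, List.length_drop]; omega
    rcases Nat.lt_or_ge l r with hlt | hge
    · -- l < r : one loop iteration / one recursion step
      have hm : PySem.Int.floordiv ((l : Int) + (r : Int)) 2 = (((l + r) / 2 : Nat) : Int) := by
        exact_mod_cast PySem.Int.floordiv_natCast (l + r) 2
      set M : Nat := (l + r) / 2 with hMdef
      have hMl : l ≤ M := by omega
      have hMr : M < r := by omega
      -- the segment's relative midpoint is the absolute midpoint shifted by l
      have hrel : (r + 1 - l - 1) / 2 = M - l := by omega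
      have hseg_get : ((arr.drop l).take (r + 1 - l)).getD (M - l) 0 = arr.getD M 0 := by
        have h1 : ((arr.drop l).take (r + 1 - l))[M - l]? = arr[M]? := by
          rw [List.getElem?_take_of_lt (by omega), List.getElem?_drop]
          congr 1; omega
        simp [List.getD, h1]
      rw [lsLoop, if_pos (by exact_mod_cast hlt), hm,
          lsGo_step p _ _ (by omega), hlen, hrel]
      have hgets : PySem.List.pyGetD ((arr.drop l).take (r + 1 - l)) ((M - l : Nat) : Int) 0
          = PySem.List.pyGetD arr ((M : Nat) : Int) 0 := by
        rw [PySem.List.pyGetD_natCast, PySem.List.pyGetD_natCast]; exact hseg_get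
      rw [hgets]
      by_cases hc : PySem.List.pyGetD arr ((M : Nat) : Int) 0 ≥ p
      · rw [if_pos hc, if_pos hc]
        have := ih l M (by omega) (by omega) (by omega)
        rw [this]
        congr 1
        rw [List.take_take]
        congr 1; omega
      · rw [if_neg hc, if_neg hc]
        have hcast : ((M : Nat) : Int) + 1 = (((M + 1 : Nat)) : Int) := by push_cast; ring
        rw [hcast]
        have := ih (M + 1) r hr (by omega) (by omega)
        rw [this]
        have hdrop : ((arr.drop l).take (r + 1 - l)).drop (M - l + 1)
            = (arr.drop (M + 1)).take (r + 1 - (M + 1)) := by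
          rw [List.drop_take]
          congr 1
          · omega
          · rw [List.drop_drop]; congr 1; omega
        rw [hdrop]
        congr 1
        push_cast; omega
    · -- l = r : loop exits, segment has one element
      have hlr' : l = r := by omega
      rw [lsLoop, if_neg (by exact_mod_cast Nat.not_lt.mpr hge),
          lsGo_base p _ _ (by omega)]

-- ===== VERDICT =====
theorem l_search_spec : Claim_equal_l_search := by
  intro arr p _
  unfold Spec_l_search l_search l_search_alt
  rcases arr with _ | ⟨x, xs⟩
  · simp [lsLoop, lsGo_base]
  · have hlen : (x :: xs).length = xs.length + 1 := rfl
    have hcast : (((x :: xs).length : Int) - 1) = ((xs.length : Nat) : Int) := by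
      rw [hlen]; push_cast; ring
    rw [hcast]
    have h0 : ((0 : Nat) : Int) = (0 : Int) := rfl
    rw [← h0, lsLoop_eq_lsGo (x :: xs) p (x :: xs).length 0 xs.length
        (by simp) (by simp [hlen]) (by omega)]
    simp
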